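-- pv_equiv track=rewrite | github.com/SSAFY-6-1-3/Algorithm | 1209/p_67256_junh.py | solution
-- ===== SOURCE A (Python) =====
-- from collections import deque
--
-- dY = (1, 0, -1, 0)
--
-- dX = (0, 1, 0, -1)
--
-- pad = [
--     [1, 2, 3],
--     [4, 5, 6],
--     [7, 8, 9],
--     ['*',0,'#']
-- ]
--
-- def dist_bfs(target, left, right):
--     q = deque([target])
--     visited = [[999 for _ in range(3)] for _ in range(4)]
--     visited[target[0]][target[1]] = 0
--     while q:
--         y, x = q.popleft()
--         dist = visited[y][x]
--         for d in range(4):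
--             ny, nx = y + dY[d], x + dX[d]
--             if ny not in range(4) or nx not in range(3): continue
--             if visited[ny][nx] <= dist + 1: continue
--             q.append((ny, nx))
--             visited[ny][nx] = dist + 1
--     l_dist = visited[left[0]][left[1]]
--     r_dist = visited[right[0]][right[1]]
--     return l_dist, r_dist
--
-- def num_to_point(num):
--     for i in range(4):
--         for j in range(3):
--             if pad[i][j] == num:
--                 return (i, j)
--
-- def solution(numbers, hand):
--     answer = ''
--     l_hand = [3, 0]
--     r_hand = [3, 2]
--     l_only = [1, 4, 7]
--     r_only = [3, 6, 9]
--
--     for num in numbers: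
--         if num in l_only:
--             answer +='L'
--             l_hand = [l_only.index(num), 0]
--         elif num in r_only:
--             answer +='R'
--             r_hand = [r_only.index(num), 2]
--         else:
--             target = num_to_point(num)
--             l_dist, r_dist = dist_bfs(target, l_hand, r_hand)
--             if l_dist == r_dist:
--                 if hand == 'left':
--                     l_hand = target
--                     answer +='L'
--                 else:
--                     r_hand = target
--                     answer +='R'
--             elif l_dist < r_dist:
--                 l_hand = target
--                 answer +='L'
--             else:
--                 r_hand = target
--                 answer +='R'
--     return answer
-- ===== SOURCE B (Python) =====
-- def solution(numbers, hand):
--     def cell(n):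
--         return (3, 1) if n == 0 else ((n - 1) // 3, (n - 1) % 3)
--     l, r = (3, 0), (3, 2)
--     answer = ''
--     for n in numbers:
--         ty, tx = cell(n)
--         if tx == 0:
--             answer += 'L'
--             l = (ty, tx)
--         elif tx == 2:
--             answer += 'R'
--             r = (ty, tx)
--         else:
--             ld = abs(ty - l[0]) + abs(tx - l[1])
--             rd = abs(ty - r[0]) + abs(tx - r[1])
--             if ld == rd:
--                 if hand == 'left':
--                     l = (ty, tx)
--                     answer += 'L'
--                 else:
--                     r = (ty, tx)
--                     answer += 'R'
--             elif ld < rd: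
--                 l = (ty, tx)
--                 answer += 'L'
--             else:
--                 r = (ty, tx)
--                 answer += 'R'
--     return answer
-- ===== Notes on version B (the rewrite author's own statement) =====
-- stated objective: simpler
-- what changed: Replaced the per-digit BFS over the keypad grid (deque + visited matrix) and the nested pad scan with a closed-form coordinate map (1-9 -> ((n-1)//3,(n-1)%3), 0 -> (3,1)) and Manhattan distances, branching on the target's column instead of membership in the l_only/r_only lists.
import Mathlib
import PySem

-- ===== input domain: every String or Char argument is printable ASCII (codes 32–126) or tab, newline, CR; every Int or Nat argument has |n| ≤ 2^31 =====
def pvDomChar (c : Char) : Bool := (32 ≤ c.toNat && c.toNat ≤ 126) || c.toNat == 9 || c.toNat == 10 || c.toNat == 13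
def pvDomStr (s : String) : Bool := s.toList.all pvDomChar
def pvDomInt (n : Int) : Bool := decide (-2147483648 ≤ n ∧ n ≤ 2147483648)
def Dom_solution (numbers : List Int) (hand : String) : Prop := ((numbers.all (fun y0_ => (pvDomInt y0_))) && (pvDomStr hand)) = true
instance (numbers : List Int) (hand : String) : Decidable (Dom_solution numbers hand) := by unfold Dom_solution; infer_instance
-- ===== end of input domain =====

-- B replaces A's per-digit BFS and keypad scan with a closed-form coordinate map and
-- Manhattan distances (simpler); return values agree on Pre_.

-- ===== PORT A =====
def dY : List Int := [1, 0, -1, 0]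
def dX : List Int := [0, 1, 0, -1]
-- pad: the '*' and '#' cells are `none` (they never compare equal to an int in Python either)
def pad : List (List (Option Int)) :=
  [[some 1, some 2, some 3], [some 4, some 5, some 6], [some 7, some 8, some 9], [none, some 0, none]]

-- visited[y][x] read; in A every read happens at indices already checked in range, so the
-- defaults are never used
def visGet (v : List (List Int)) (y x : Int) : Int :=
  ((PySem.List.pyGet? ((PySem.List.pyGet? v y).getD []) x).getD 999)
-- visited[y][x] := d; only called after the in-range check, where toNat is exact
def visSet (v : List (List Int)) (y x d : Int) : List (List Int) :=
  v.set y.toNat (((PySem.List.pyGet? v y).getD []).set x.toNat d)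

-- the `while q:` loop of dist_bfs; fuel is a totality guard only (the queue of this BFS on
-- the fixed 4x3 grid empties long before 200 pops, so the 0-fuel branch is never reached)
def bfsLoop : Nat → List (Int × Int) → List (List Int) → List (List Int)
  | 0, _, v => v
  | _ + 1, [], v => v
  | fuel + 1, (y, x) :: q, v =>
    let dist := visGet v y x
    let s := (List.range 4).foldl
      (fun (s : List (Int × Int) × List (List Int)) d =>
        let ny := y + (PySem.List.pyGet? dY (d : Int)).getD 0
        let nx := x + (PySem.List.pyGet? dX (d : Int)).getD 0
        if ¬(0 ≤ ny ∧ ny < 4) ∨ ¬(0 ≤ nx ∧ nx < 3) then s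
        else if visGet s.2 ny nx ≤ dist + 1 then s
        else (s.1 ++ [(ny, nx)], visSet s.2 ny nx (dist + 1)))
      (q, v)
    bfsLoop fuel s.1 s.2

def bfsGrid (target : Int × Int) : List (List Int) :=
  let v0 : List (List Int) := List.replicate 4 (List.replicate 3 999)
  bfsLoop 200 [target] (visSet v0 target.1 target.2 0)

def dist_bfs (target l r : Int × Int) : Int × Int :=
  let v := bfsGrid target
  (visGet v l.1 l.2, visGet v r.1 r.2)

-- first (i, j) with pad[i][j] == num, None if absent
def num_to_point (num : Int) : Option (Int × Int) :=
  (List.range 4).findSome? fun i =>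
    (List.range 3).findSome? fun j =>
      if PySem.List.pyGet? ((PySem.List.pyGet? pad (i : Int)).getD []) (j : Int) = some (some num)
      then some ((i : Int), (j : Int)) else none

def solLoop (hand : String) : List Int → String → Int × Int → Int × Int → String
  | [], ans, _, _ => ans
  | num :: rest, ans, l, r =>
    if num ∈ ([1, 4, 7] : List Int) then
      solLoop hand rest (ans ++ "L") (((PySem.List.index? ([1, 4, 7] : List Int) num).getD 0 : Int), 0) r
    else if num ∈ ([3, 6, 9] : List Int) then
      solLoop hand rest (ans ++ "R") l (((PySem.List.index? ([3, 6, 9] : List Int) num).getD 0 : Int), 2)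
    else
      match num_to_point num with
      | none => ans  -- Python raises TypeError here (excluded by Pre_solution)
      | some target =>
        let ds := dist_bfs target l r
        if ds.1 = ds.2 then
          if hand = "left" then solLoop hand rest (ans ++ "L") target r
          else solLoop hand rest (ans ++ "R") l target
        else if ds.1 < ds.2 then solLoop hand rest (ans ++ "L") target r
        else solLoop hand rest (ans ++ "R") l target

def solution (numbers : List Int) (hand : String) : String :=
  solLoop hand numbers "" (3, 0) (3, 2)

-- ===== PORT B =====
def cellB (n : Int) : Int × Int :=
  if n = 0 then (3, 1) else (PySem.Int.floordiv (n - 1) 3, PySem.Int.mod (n - 1) 3)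

def solAltLoop (hand : String) : List Int → String → Int × Int → Int × Int → String
  | [], ans, _, _ => ans
  | n :: rest, ans, l, r =>
    let t := cellB n
    if t.2 = 0 then solAltLoop hand rest (ans ++ "L") t r
    else if t.2 = 2 then solAltLoop hand rest (ans ++ "R") l t
    else
      let ld := |t.1 - l.1| + |t.2 - l.2|
      let rd := |t.1 - r.1| + |t.2 - r.2|
      if ld = rd then
        if hand = "left" then solAltLoop hand rest (ans ++ "L") t r
        else solAltLoop hand rest (ans ++ "R") l t
      else if ld < rd then solAltLoop hand rest (ans ++ "L") t r
      else solAltLoop hand rest (ans ++ "R") l t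

def solution_alt (numbers : List Int) (hand : String) : String :=
  solAltLoop hand numbers "" (3, 0) (3, 2)

-- ===== PRECONDITION & SPEC =====
-- A raises TypeError (num_to_point returns None) on any number outside 0..9; Pre_ excludes exactly those.
def Pre_solution (numbers : List Int) (hand : String) : Prop :=
  ∀ n ∈ numbers, 0 ≤ n ∧ n ≤ 9
instance (numbers : List Int) (hand : String) : Decidable (Pre_solution numbers hand) := by
  unfold Pre_solution; infer_instance

def pvWitness_solution : List Int × String := ([1, 0, 5, 9, 2], "right")

def Spec_solution (numbers : List Int) (hand : String) (out : String) : Prop := out = solution_alt numbers hand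
instance (numbers : List Int) (hand : String) (out : String) : Decidable (Spec_solution numbers hand out) := by unfold Spec_solution; infer_instance

-- ===== CLAIM (what is proved, stated in full; the proofs are below) =====
def Claim_equal_solution : Prop := ∀ (numbers : List Int) (hand : String), Dom_solution numbers hand → Pre_solution numbers hand → Spec_solution numbers hand (solution numbers hand)

-- ===== LEMMAS AND PROOFS =====

-- cells the left hand can occupy (initial (3,0), the l_only column, and the middle column)
def Lcells : List (Int × Int) := [(3, 0), (0, 0), (1, 0), (2, 0), (0, 1), (1, 1), (2, 1), (3, 1)]
-- cells the right hand can occupy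
def Rcells : List (Int × Int) := [(3, 2), (0, 2), (1, 2), (2, 2), (0, 1), (1, 1), (2, 1), (3, 1)]
-- the middle-column targets reaching the BFS branch
def Tcells : List (Int × Int) := [(0, 1), (1, 1), (2, 1), (3, 1)]

-- BFS distances on the full 4x3 grid are Manhattan distances
lemma dist_bfs_eq : ∀ t ∈ Tcells, ∀ l ∈ Lcells, ∀ r ∈ Rcells,
    dist_bfs t l r = (|t.1 - l.1| + |t.2 - l.2|, |t.1 - r.1| + |t.2 - r.2|) := by
  decide

lemma loop_eq (hand : String) : ∀ nums : List Int, (∀ n ∈ nums, 0 ≤ n ∧ n ≤ 9) →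
    ∀ l ∈ Lcells, ∀ r ∈ Rcells, ∀ ans,
    solLoop hand nums ans l r = solAltLoop hand nums ans l r := by
  intro nums
  induction nums with
  | nil => intro _ l _ r _ ans; rfl
  | cons num rest ih =>
    intro h l hl r hr ans
    obtain ⟨hn0, hn9⟩ := h num (List.mem_cons_self ..)
    have hrest : ∀ n ∈ rest, 0 ≤ n ∧ n ≤ 9 := fun n hn => h n (List.mem_cons_of_mem _ hn)
    interval_cases num
    · -- num = 0
      simp only [solLoop, solAltLoop, show num_to_point 0 = some ((3:Int),(1:Int)) from by decide,
        show cellB 0 = ((3:Int),(1:Int)) from by decide]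
      rw [dist_bfs_eq ((3:Int),(1:Int)) (by decide) l hl r hr]
      norm_num
      split_ifs <;>
        first
        | exact ih hrest _ (by decide) _ hr _
        | exact ih hrest _ hl _ (by decide) _
    · -- num = 1
      simp only [solLoop, solAltLoop, show cellB 1 = ((0:Int),(0:Int)) from by decide]
      norm_num [PySem.List.index?]
      exact ih hrest _ (by decide) _ hr _
    · -- num = 2
      simp only [solLoop, solAltLoop, show num_to_point 2 = some ((0:Int),(1:Int)) from by decide,
        show cellB 2 = ((0:Int),(1:Int)) from by decide]
      rw [dist_bfs_eq ((0:Int),(1:Int)) (by decide) l hl r hr]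
      norm_num
      split_ifs <;>
        first
        | exact ih hrest _ (by decide) _ hr _
        | exact ih hrest _ hl _ (by decide) _
    · -- num = 3
      simp only [solLoop, solAltLoop, show cellB 3 = ((0:Int),(2:Int)) from by decide]
      norm_num [PySem.List.index?]
      exact ih hrest _ hl _ (by decide) _
    · -- num = 4
      simp only [solLoop, solAltLoop, show cellB 4 = ((1:Int),(0:Int)) from by decide]
      norm_num [PySem.List.index?]
      exact ih hrest _ (by decide) _ hr _
    · -- num = 5
      simp only [solLoop, solAltLoop, show num_to_point 5 = some ((1:Int),(1:Int)) from by decide,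
        show cellB 5 = ((1:Int),(1:Int)) from by decide]
      rw [dist_bfs_eq ((1:Int),(1:Int)) (by decide) l hl r hr]
      norm_num
      split_ifs <;>
        first
        | exact ih hrest _ (by decide) _ hr _
        | exact ih hrest _ hl _ (by decide) _
    · -- num = 6
      simp only [solLoop, solAltLoop, show cellB 6 = ((1:Int),(2:Int)) from by decide]
      norm_num [PySem.List.index?]
      exact ih hrest _ hl _ (by decide) _
    · -- num = 7
      simp only [solLoop, solAltLoop, show cellB 7 = ((2:Int),(0:Int)) from by decide]
      norm_num [PySem.List.index?]
      exact ih hrest _ (by decide) _ hr _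
    · -- num = 8
      simp only [solLoop, solAltLoop, show num_to_point 8 = some ((2:Int),(1:Int)) from by decide,
        show cellB 8 = ((2:Int),(1:Int)) from by decide]
      rw [dist_bfs_eq ((2:Int),(1:Int)) (by decide) l hl r hr]
      norm_num
      split_ifs <;>
        first
        | exact ih hrest _ (by decide) _ hr _
        | exact ih hrest _ hl _ (by decide) _
    · -- num = 9
      simp only [solLoop, solAltLoop, show cellB 9 = ((2:Int),(2:Int)) from by decide]
      norm_num [PySem.List.index?]
      exact ih hrest _ hl _ (by decide) _

-- ===== VERDICT (by name: the statement is the Claim_ definition above) =====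
theorem solution_spec : Claim_equal_solution := by
  intro numbers hand _ hpre
  unfold Spec_solution solution solution_alt
  exact loop_eq hand numbers hpre _ (by decide) _ (by decide) _
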